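-- pv_equiv track=rewrite | github.com/atar-axis/xpadneo | generate-xpadneo-patch.py | find_kconfig_insertion_point
-- ===== SOURCE A (Python) =====
-- def find_kconfig_insertion_point(kconfig_content):
--     """Find the best place to insert xpadneo Kconfig entry"""
--     lines = kconfig_content.split('\n')
--
--     # Look for "endif # HID" - most common
--     for i, line in enumerate(lines):
--         if 'endif # HID' in line and 'HID_SUPPORT' not in line:
--             return i
--
--     # Fallback: look for "endif # HID_SUPPORT"
--     for i, line in enumerate(lines):
--         if 'endif # HID_SUPPORT' in line:
--             return i
--
--     return None
-- ===== SOURCE B (Python) =====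
-- def find_kconfig_insertion_point(kconfig_content):
--     """Find the best place to insert xpadneo Kconfig entry (single pass)"""
--     fallback = None
--     for i, line in enumerate(kconfig_content.split('\n')):
--         if 'endif # HID' in line and 'HID_SUPPORT' not in line:
--             return i
--         if 'endif # HID_SUPPORT' in line and fallback is None:
--             fallback = i
--     return fallback
-- ===== Notes on version B (the rewrite author's own statement) =====
-- stated objective: simpler
-- what changed: Replaces A's two separate scans over the lines by one pass that returns immediately on a primary match and remembers the first secondary match as a fallback.
import Mathlib
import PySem

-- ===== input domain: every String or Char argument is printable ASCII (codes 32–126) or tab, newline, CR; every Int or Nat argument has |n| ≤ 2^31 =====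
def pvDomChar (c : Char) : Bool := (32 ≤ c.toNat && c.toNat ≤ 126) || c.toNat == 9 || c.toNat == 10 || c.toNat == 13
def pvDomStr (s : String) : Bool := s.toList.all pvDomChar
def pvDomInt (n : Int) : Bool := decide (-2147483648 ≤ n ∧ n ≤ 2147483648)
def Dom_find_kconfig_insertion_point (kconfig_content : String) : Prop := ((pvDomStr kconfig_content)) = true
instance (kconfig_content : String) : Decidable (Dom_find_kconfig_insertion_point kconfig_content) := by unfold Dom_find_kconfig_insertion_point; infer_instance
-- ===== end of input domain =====

-- B replaces A's two scans over the lines by one pass with a pending fallback; objective: simpler.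

-- ===== PORT A =====
-- first loop: return i on the first line with 'endif # HID' and without 'HID_SUPPORT'
def pvLoopA1 : List (Int × List Char) → Option Int
  | [] => none
  | (i, line) :: rest =>
    if PySem.Chars.isIn "endif # HID".toList line && !(PySem.Chars.isIn "HID_SUPPORT".toList line) then some i
    else pvLoopA1 rest

-- fallback loop: return i on the first line with 'endif # HID_SUPPORT'
def pvLoopA2 : List (Int × List Char) → Option Int
  | [] => none
  | (i, line) :: rest =>
    if PySem.Chars.isIn "endif # HID_SUPPORT".toList line then some i
    else pvLoopA2 rest

def find_kconfig_insertion_point (kconfig_content : String) : Option Int :=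
  let lines := PySem.Chars.splitOn kconfig_content.toList "\n".toList
  match pvLoopA1 (PySem.List.enumerate lines 0) with
  | some i => some i
  | none => pvLoopA2 (PySem.List.enumerate lines 0)

-- ===== PORT B =====
-- single pass: return on primary match, carry the first secondary match as fallback
def pvLoopB : List (Int × List Char) → Option Int → Option Int
  | [], fallback => fallback
  | (i, line) :: rest, fallback =>
    if PySem.Chars.isIn "endif # HID".toList line && !(PySem.Chars.isIn "HID_SUPPORT".toList line) then some i
    else
      pvLoopB rest
        (if PySem.Chars.isIn "endif # HID_SUPPORT".toList line && fallback == none then some i else fallback)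

def find_kconfig_insertion_point_alt (kconfig_content : String) : Option Int :=
  pvLoopB (PySem.List.enumerate (PySem.Chars.splitOn kconfig_content.toList "\n".toList) 0) none

-- ===== PRECONDITION & SPEC =====
def Spec_find_kconfig_insertion_point (kconfig_content : String) (out : Option Int) : Prop := out = find_kconfig_insertion_point_alt kconfig_content
instance (kconfig_content : String) (out : Option Int) : Decidable (Spec_find_kconfig_insertion_point kconfig_content out) := by unfold Spec_find_kconfig_insertion_point; infer_instance

-- ===== CLAIM (what is proved, stated in full; the proofs are below) =====
def Claim_equal_find_kconfig_insertion_point : Prop := ∀ (kconfig_content : String), Dom_find_kconfig_insertion_point kconfig_content → Spec_find_kconfig_insertion_point kconfig_content (find_kconfig_insertion_point kconfig_content)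

-- ===== LEMMAS AND PROOFS =====
theorem pvLoopB_eq (xs : List (Int × List Char)) :
    ∀ fb, pvLoopB xs fb =
      match pvLoopA1 xs with
      | some i => some i
      | none => match fb with | some j => some j | none => pvLoopA2 xs := by
  induction xs with
  | nil => intro fb; cases fb <;> simp [pvLoopB, pvLoopA1, pvLoopA2]
  | cons p rest ih =>
    intro fb
    obtain ⟨i, line⟩ := p
    rw [pvLoopB, pvLoopA1, pvLoopA2]
    by_cases hp : (PySem.Chars.isIn "endif # HID".toList line && !(PySem.Chars.isIn "HID_SUPPORT".toList line)) = true
    · rw [if_pos hp, if_pos hp]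
    · rw [if_neg hp, if_neg hp, ih]
      cases pvLoopA1 rest <;> cases fb <;>
        rcases Bool.eq_false_or_eq_true (PySem.Chars.isIn
          ['e','n','d','i','f',' ','#',' ','H','I','D','_','S','U','P','P','O','R','T'] line) with hs | hs <;>
        simp [hs]

-- ===== VERDICT (by name: the statement is the Claim_ definition above) =====
theorem find_kconfig_insertion_point_spec : Claim_equal_find_kconfig_insertion_point := by
  intro kc _
  unfold Spec_find_kconfig_insertion_point find_kconfig_insertion_point find_kconfig_insertion_point_alt
  rw [pvLoopB_eq]
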